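-- pv_equiv track=rewrite | github.com/lopezac/TP_TDA | greedy.py | es_culpable
-- ===== SOURCE A (Python) =====
-- def es_culpable(transacciones,tiempos_sospechosos):
--     resultado=[]
--     valores=dic_transacciones(transacciones)
--     transacciones_ord=ordenar_tiempos(transacciones)
--     for i in range(len(tiempos_sospechosos)):
--         for j in range(len(transacciones_ord)):
--             cota_inferior=transacciones_ord[j][0]-transacciones_ord[j][1]
--             cota_superior=transacciones_ord[j][0]+transacciones_ord[j][1]
--
--             if  (tiempos_sospechosos[i]>=cota_inferior and tiempos_sospechosos[i]<=cota_superior and valores[transacciones_ord[j]] > 0):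
--                 valores[transacciones_ord[j]]-=1
--                 resultado.append((tiempos_sospechosos[i],transacciones_ord[j]))
--                 break
--
--     return resultado
--
-- def dic_transacciones(t):
--     dic={}
--     for tran in t:
--         dic[tran] = dic.get(tran,0)+1
--     return dic
--
-- def ordenar_tiempos(t):
--     t=sorted(t, key=lambda punto: (punto[0]+punto[1]))
--     return t
-- ===== SOURCE B (Python) =====
-- def es_culpable(transacciones, tiempos_sospechosos):
--     # Compress the sorted transactions into unique intervals with multiplicities,
--     # then answer each query by binary-searching the first interval whose upper
--     # bound reaches the time and scanning from there for one with capacity left.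
--     orden = sorted(transacciones, key=lambda p: p[0] + p[1])
--     entradas = []  # list of [(centro, radio), restantes], unique, sorted by centro+radio
--     for tr in orden:
--         for i in range(len(entradas)):
--             if entradas[i][0] == tr:
--                 entradas[i][1] += 1
--                 break
--         else:
--             entradas.append([tr, 1])
--     resultado = []
--     n = len(entradas)
--     for t in tiempos_sospechosos:
--         lo, hi = 0, n
--         while lo < hi:
--             m = (lo + hi) // 2
--             c, r = entradas[m][0]
--             if c + r < t:
--                 lo = m + 1
--             else:
--                 hi = m
--         for i in range(lo, n):
--             (c, r), k = entradas[i]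
--             if c - r <= t and k > 0:
--                 entradas[i][1] = k - 1
--                 resultado.append((t, (c, r)))
--                 break
--     return resultado
-- ===== Notes on version B (the rewrite author's own statement) =====
-- stated objective: faster
-- what changed: B compresses the sorted transactions into a list of unique intervals with multiplicities and answers each suspect time by binary-searching the first interval whose upper bound reaches the time, instead of A's per-query linear scan of the full sorted list against a separate count dict.
import Mathlib
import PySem

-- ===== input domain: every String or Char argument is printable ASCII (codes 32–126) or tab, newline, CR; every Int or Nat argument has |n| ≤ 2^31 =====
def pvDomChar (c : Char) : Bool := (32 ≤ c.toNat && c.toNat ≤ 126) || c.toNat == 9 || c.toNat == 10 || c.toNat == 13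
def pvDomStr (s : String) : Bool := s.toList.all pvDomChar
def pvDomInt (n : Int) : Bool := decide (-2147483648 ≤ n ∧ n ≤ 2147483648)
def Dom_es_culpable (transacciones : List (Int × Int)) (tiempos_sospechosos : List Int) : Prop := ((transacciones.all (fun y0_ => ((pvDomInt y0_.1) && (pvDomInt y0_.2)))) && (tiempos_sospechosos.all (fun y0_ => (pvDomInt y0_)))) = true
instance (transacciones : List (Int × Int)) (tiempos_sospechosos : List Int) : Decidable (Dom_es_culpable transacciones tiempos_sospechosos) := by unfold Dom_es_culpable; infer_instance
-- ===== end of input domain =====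

-- ===== PORT A =====
def dic_transacciones (t : List (Int × Int)) : PySem.Dict (Int × Int) Int :=
  t.foldl (fun dic tran => dic.insert tran (dic.getD tran 0 + 1)) PySem.Dict.empty

def ordenar_tiempos (t : List (Int × Int)) : List (Int × Int) :=
  PySem.List.sorted t (fun punto => punto.1 + punto.2)

-- inner 'for j in range(len(transacciones_ord)) … break' loop of A; 'valores[tr]' is read with
-- getD 0, exact here because every element of the scanned list is a key of valores.
def es_culpable_buscar (valores : PySem.Dict (Int × Int) Int) (ts : Int) :
    List (Int × Int) → Option (Int × Int)
  | [] => none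
  | tr :: resto =>
    if ts ≥ tr.1 - tr.2 ∧ ts ≤ tr.1 + tr.2 ∧ valores.getD tr 0 > 0 then some tr
    else es_culpable_buscar valores ts resto

def es_culpable (transacciones : List (Int × Int)) (tiempos_sospechosos : List Int) : List (Int × (Int × Int)) :=
  let valores := dic_transacciones transacciones
  let transacciones_ord := ordenar_tiempos transacciones
  (tiempos_sospechosos.foldl
    (fun st t =>
      match es_culpable_buscar st.1 t transacciones_ord with
      | none => st
      | some tr => (st.1.insert tr (st.1.getD tr 0 - 1), st.2 ++ [(t, tr)]))
    (valores, ([] : List (Int × (Int × Int))))).2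

-- ===== PORT B =====
-- one step of B's build loop: bump the count of tr if present, else append (tr, 1)
def es_culpable_alt_agrega (entradas : List ((Int × Int) × Int)) (tr : Int × Int) :
    List ((Int × Int) × Int) :=
  match entradas with
  | [] => [(tr, 1)]
  | e :: resto => if e.1 = tr then (e.1, e.2 + 1) :: resto else e :: es_culpable_alt_agrega resto tr

-- B's hand-written binary search: first index in [lo, hi) whose interval's upper bound reaches t
def es_culpable_alt_bisect (entradas : List ((Int × Int) × Int)) (t : Int) (lo hi : Nat) : Nat :=
  if _h : lo < hi then
    let m := (lo + hi) / 2
    let e := entradas.getD m ((0, 0), 0)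
    if e.1.1 + e.1.2 < t then es_culpable_alt_bisect entradas t (m + 1) hi
    else es_culpable_alt_bisect entradas t lo m
  else lo
termination_by hi - lo
decreasing_by all_goals omega

-- B's 'for i in range(lo, n) … break' loop, applied to the suffix from the bisection point:
-- returns the matched interval and the suffix with that entry's count decremented
def es_culpable_alt_busca (t : Int) :
    List ((Int × Int) × Int) → Option ((Int × Int) × List ((Int × Int) × Int))
  | [] => none
  | e :: resto =>
    if e.1.1 - e.1.2 ≤ t ∧ e.2 > 0 then some (e.1, (e.1, e.2 - 1) :: resto)
    else
      match es_culpable_alt_busca t resto with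
      | none => none
      | some (p, resto') => some (p, e :: resto')

def es_culpable_alt (transacciones : List (Int × Int)) (tiempos_sospechosos : List Int) : List (Int × (Int × Int)) :=
  let orden := PySem.List.sorted transacciones (fun p => p.1 + p.2)
  let entradas := orden.foldl es_culpable_alt_agrega []
  (tiempos_sospechosos.foldl
    (fun st t =>
      let lo := es_culpable_alt_bisect st.1 t 0 st.1.length
      match es_culpable_alt_busca t (st.1.drop lo) with
      | none => st
      | some (p, resto') => (st.1.take lo ++ resto', st.2 ++ [(t, p)]))
    (entradas, ([] : List (Int × (Int × Int))))).2

-- ===== PRECONDITION & SPEC =====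
def Spec_es_culpable (transacciones : List (Int × Int)) (tiempos_sospechosos : List Int) (out : List (Int × (Int × Int))) : Prop := out = es_culpable_alt transacciones tiempos_sospechosos
instance (transacciones : List (Int × Int)) (tiempos_sospechosos : List Int) (out : List (Int × (Int × Int))) : Decidable (Spec_es_culpable transacciones tiempos_sospechosos out) := by unfold Spec_es_culpable; infer_instance

-- ===== CLAIM (what is proved, stated in full; the proofs are below) =====
def Claim_equal_es_culpable : Prop := ∀ (transacciones : List (Int × Int)) (tiempos_sospechosos : List Int), Dom_es_culpable transacciones tiempos_sospechosos → Spec_es_culpable transacciones tiempos_sospechosos (es_culpable transacciones tiempos_sospechosos)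

-- ===== LEMMAS AND PROOFS =====

-- number of units entry list E holds for interval p (first matching entry's count, 0 if absent)
def pvCnt (E : List ((Int × Int) × Int)) (p : Int × Int) : Int :=
  match E.find? (fun e => e.1 = p) with
  | some e => e.2
  | none => 0

-- the effect of one build step on the list of distinct intervals
def pvUniqStep (u : List (Int × Int)) (x : Int × Int) : List (Int × Int) :=
  if x ∈ u then u else u ++ [x]

lemma pvCnt_cons (e : (Int × Int) × Int) (E : List ((Int × Int) × Int)) (p : Int × Int) :
    pvCnt (e :: E) p = if e.1 = p then e.2 else pvCnt E p := by
  simp only [pvCnt, List.find?_cons]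
  by_cases h : e.1 = p <;> simp [h]

lemma find?_congr_mem {α : Type} (l : List α) (p q : α → Bool)
    (h : ∀ x ∈ l, p x = q x) : l.find? p = l.find? q := by
  induction l with
  | nil => rfl
  | cons a l ih =>
    simp only [List.find?_cons, h a (by simp)]
    cases q a <;> simp [ih (fun x hx => h x (by simp [hx]))]

lemma find?_filter_of_imp {α : Type} (l : List α) (p q : α → Bool)
    (h : ∀ x, p x = false → q x = false) : (l.filter p).find? q = l.find? q := by
  induction l with
  | nil => rfl
  | cons a l ih =>
    by_cases hp : p a
    · simp [hp, List.find?_cons, ih]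
    · simp only [Bool.not_eq_true] at hp
      simp [hp, h a hp, ih]

lemma agrega_fst (E : List ((Int × Int) × Int)) (x : Int × Int) :
    (es_culpable_alt_agrega E x).map Prod.fst = pvUniqStep (E.map Prod.fst) x := by
  induction E with
  | nil => simp [es_culpable_alt_agrega, pvUniqStep]
  | cons e E ih =>
    simp only [es_culpable_alt_agrega]
    split_ifs with h
    · subst h
      simp [pvUniqStep]
    · simp only [List.map_cons, ih, pvUniqStep, List.mem_cons]
      by_cases hm : x ∈ E.map Prod.fst
      · simp [hm]
      · simp [hm, Ne.symm h]

lemma agrega_cnt (E : List ((Int × Int) × Int)) (x p : Int × Int) :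
    pvCnt (es_culpable_alt_agrega E x) p = pvCnt E p + (if p = x then 1 else 0) := by
  induction E with
  | nil =>
    by_cases h : p = x <;> simp [es_culpable_alt_agrega, pvCnt, h, Ne.symm]
  | cons e E ih =>
    by_cases hax : e.1 = x
    · rw [show es_culpable_alt_agrega (e :: E) x = (e.1, e.2 + 1) :: E from by
        simp [es_culpable_alt_agrega, hax]]
      rw [pvCnt_cons, pvCnt_cons]
      by_cases hp : e.1 = p
      · rw [if_pos hp, if_pos hp, if_pos (hp.symm.trans hax)]
      · rw [if_neg hp, if_neg hp, if_neg (fun hpx => hp (hax.trans hpx.symm))]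
        ring
    · rw [show es_culpable_alt_agrega (e :: E) x = e :: es_culpable_alt_agrega E x from by
        simp [es_culpable_alt_agrega, hax]]
      rw [pvCnt_cons, pvCnt_cons]
      by_cases hp : e.1 = p
      · rw [if_pos hp, if_pos hp, if_neg (fun hpx => hax (hp.trans hpx))]
        ring
      · rw [if_neg hp, if_neg hp, ih]

lemma foldl_agrega_fst (l : List (Int × Int)) (E : List ((Int × Int) × Int)) :
    (l.foldl es_culpable_alt_agrega E).map Prod.fst = l.foldl pvUniqStep (E.map Prod.fst) := by
  induction l generalizing E with
  | nil => rfl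
  | cons a l ih => simp [List.foldl_cons, ih, agrega_fst]

lemma foldl_agrega_cnt (l : List (Int × Int)) (E : List ((Int × Int) × Int)) (p : Int × Int) :
    pvCnt (l.foldl es_culpable_alt_agrega E) p = pvCnt E p + l.count p := by
  induction l generalizing E with
  | nil => simp
  | cons a l ih =>
    rw [List.foldl_cons, ih, agrega_cnt, List.count_cons]
    by_cases h : p = a
    · subst h
      rw [if_pos rfl, show ∀ x : Int × Int, (x == x) = true from fun x => beq_self_eq_true x]
      norm_num
      ring
    · have hba : (a == p) = false := beq_eq_false_iff_ne.mpr (Ne.symm h)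
      rw [if_neg h, hba]
      norm_num

lemma foldl_uniqStep_nodup (l : List (Int × Int)) (u : List (Int × Int)) (hu : u.Nodup) :
    (l.foldl pvUniqStep u).Nodup := by
  induction l generalizing u with
  | nil => exact hu
  | cons a l ih =>
    simp only [List.foldl_cons, pvUniqStep]
    split_ifs with h
    · exact ih u hu
    · refine ih _ (List.Nodup.append hu (by simp) ?_)
      intro y hy hy'
      simp only [List.mem_singleton] at hy'
      exact h (hy' ▸ hy)

lemma foldl_uniqStep_pairwise (key : (Int × Int) → Int) (l u : List (Int × Int))
    (hu : u.Pairwise (fun a b => key a ≤ key b))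
    (hul : ∀ y ∈ u, ∀ x ∈ l, key y ≤ key x)
    (hl : l.Pairwise (fun a b => key a ≤ key b)) :
    (l.foldl pvUniqStep u).Pairwise (fun a b => key a ≤ key b) := by
  induction l generalizing u with
  | nil => exact hu
  | cons a l ih =>
    simp only [List.pairwise_cons] at hl
    simp only [List.foldl_cons, pvUniqStep]
    split_ifs with h
    · exact ih u hu (fun y hy x hx => hul y hy x (by simp [hx])) hl.2
    · refine ih _ ?_ ?_ hl.2
      · refine List.pairwise_append.mpr ⟨hu, by simp, ?_⟩
        intro y hy x hx
        simp only [List.mem_singleton] at hx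
        subst hx
        exact hul y hy x (by simp)
      · intro y hy x hx
        rcases List.mem_append.mp hy with hy | hy
        · exact hul y hy x (by simp [hx])
        · simp at hy; subst hy; exact hl.1 x hx

lemma foldl_uniqStep_find? (q : (Int × Int) → Bool) (l u : List (Int × Int)) :
    (l.foldl pvUniqStep u).find? q
      = ((u.find? q).or ((l.filter (fun x => decide (x ∉ u))).find? q)) := by
  induction l generalizing u with
  | nil => cases h : u.find? q <;> simp [h]
  | cons a l ih =>
    simp only [List.foldl_cons, pvUniqStep, List.filter_cons]
    by_cases h : a ∈ u
    · rw [if_pos h, ih, show (decide (a ∉ u)) = false from by simp [h]]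
      simp [decide_not]
    · rw [if_neg h, ih, show (decide (a ∉ u)) = true from by simp [h], if_pos rfl,
        List.find?_append, Option.or_assoc]
      congr 1
      rw [List.find?_cons]
      by_cases hq : q a
      · rw [hq, List.find?_cons, hq]
        simp
      · have hqf : q a = false := by simpa using hq
        rw [hqf, List.find?_cons, hqf]
        simp only [List.find?_nil, Option.none_or]
        rw [show (fun x : Int × Int => decide (x ∉ u ++ [a]))
              = (fun x : Int × Int => decide (x ≠ a) && decide (x ∉ u)) from by
            funext x; by_cases h1 : x = a <;> by_cases h2 : x ∈ u <;> simp [h1, h2],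
          ← List.filter_filter]
        exact find?_filter_of_imp _ _ _ (fun x hx => by
          have hxa : x = a := by simpa using hx
          simpa [hxa] using hqf)

lemma buscar_eq_find? (d : PySem.Dict (Int × Int) Int) (t : Int) (l : List (Int × Int)) :
    es_culpable_buscar d t l
      = l.find? (fun x => decide (t ≥ x.1 - x.2) && decide (t ≤ x.1 + x.2) && decide (d.getD x 0 > 0)) := by
  induction l with
  | nil => rfl
  | cons a l ih =>
    rw [List.find?_cons]
    simp only [es_culpable_buscar]
    split_ifs with h
    · rw [show (decide (t ≥ a.1 - a.2) && decide (t ≤ a.1 + a.2) && decide (d.getD a 0 > 0)) = true by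
        simp [h.1, h.2.1, h.2.2]]
    · rw [show (decide (t ≥ a.1 - a.2) && decide (t ≤ a.1 + a.2) && decide (d.getD a 0 > 0)) = false by
        by_contra hc
        simp only [Bool.not_eq_false, Bool.and_eq_true, decide_eq_true_eq] at hc
        exact h ⟨hc.1.1, hc.1.2, hc.2⟩]
      exact ih

-- busca finds the first entry with enough capacity and low-enough lower bound,
-- and decrements exactly that entry
lemma busca_spec (t : Int) (L : List ((Int × Int) × Int)) :
    (es_culpable_alt_busca t L = none ∧ L.find? (fun e => decide (e.1.1 - e.1.2 ≤ t) && decide (e.2 > 0)) = none) ∨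
    (∃ e L', es_culpable_alt_busca t L = some (e.1, L')
      ∧ L.find? (fun e => decide (e.1.1 - e.1.2 ≤ t) && decide (e.2 > 0)) = some e
      ∧ L'.map Prod.fst = L.map Prod.fst
      ∧ ((L.map Prod.fst).Nodup →
          (pvCnt L' e.1 = pvCnt L e.1 - 1 ∧ ∀ q, q ≠ e.1 → pvCnt L' q = pvCnt L q))) := by
  induction L with
  | nil => left; simp [es_culpable_alt_busca]
  | cons e L ih =>
    by_cases h : e.1.1 - e.1.2 ≤ t ∧ e.2 > 0
    · right
      refine ⟨e, (e.1, e.2 - 1) :: L, by simp [es_culpable_alt_busca, h], ?_, by simp, ?_⟩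
      · rw [List.find?_cons, show (decide (e.1.1 - e.1.2 ≤ t) && decide (e.2 > 0)) = true from by
          simp [h.1, h.2]]
      · intro hnd
        refine ⟨by simp [pvCnt_cons], fun q hq => ?_⟩
        rw [pvCnt_cons, pvCnt_cons, if_neg (fun hh => hq hh.symm), if_neg (fun hh => hq hh.symm)]
    · have hf : (decide (e.1.1 - e.1.2 ≤ t) && decide (e.2 > 0)) = false := by
        by_contra hc
        simp only [Bool.not_eq_false, Bool.and_eq_true, decide_eq_true_eq] at hc
        exact h hc
      rcases ih with ⟨h1, h2⟩ | ⟨p, L', h1, h2, h3, h4⟩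
      · left
        constructor
        · simp only [es_culpable_alt_busca, h1]
          rw [if_neg h]
        · rw [List.find?_cons, hf, h2]
      · right
        refine ⟨p, e :: L', ?_, ?_, by simp [h3], ?_⟩
        · simp only [es_culpable_alt_busca, h1]
          rw [if_neg h]
        · rw [List.find?_cons, hf, h2]
        · intro hnd
          simp only [List.map_cons, List.nodup_cons] at hnd
          have hpL : p ∈ L := List.mem_of_find?_eq_some h2
          have hne : e.1 ≠ p.1 := fun hh => hnd.1 (hh ▸ List.mem_map_of_mem hpL)
          rcases h4 hnd.2 with ⟨h4a, h4b⟩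
          refine ⟨?_, fun q hq => ?_⟩
          · rw [pvCnt_cons, pvCnt_cons, if_neg hne, if_neg hne]
            exact h4a
          · by_cases hqe : e.1 = q
            · rw [pvCnt_cons, pvCnt_cons, if_pos hqe, if_pos hqe]
            · rw [pvCnt_cons, pvCnt_cons, if_neg hqe, if_neg hqe]
              exact h4b q hq

-- the bisection returns a split point: everything before it has upper bound < t,
-- everything from it on has upper bound ≥ t
lemma bisect_spec (E : List ((Int × Int) × Int)) (t : Int)
    (hpair : E.Pairwise (fun a b => a.1.1 + a.1.2 ≤ b.1.1 + b.1.2)) :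
    ∀ (n lo hi : Nat), hi - lo = n → lo ≤ hi → hi ≤ E.length →
    (∀ e ∈ E.take lo, e.1.1 + e.1.2 < t) → (∀ e ∈ E.drop hi, t ≤ e.1.1 + e.1.2) →
    (∀ e ∈ E.take (es_culpable_alt_bisect E t lo hi), e.1.1 + e.1.2 < t) ∧
    (∀ e ∈ E.drop (es_culpable_alt_bisect E t lo hi), t ≤ e.1.1 + e.1.2) := by
  intro n
  induction n using Nat.strong_induction_on with
  | _ n ih =>
    intro lo hi hn hlh hhE hlo hhi
    rw [es_culpable_alt_bisect]
    by_cases h : lo < hi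
    · rw [dif_pos h]
      have hmlt : (lo + hi) / 2 < E.length := by omega
      have hget : E.getD ((lo + hi) / 2) ((0, 0), 0) = E[(lo + hi) / 2] :=
        List.getD_eq_getElem E _ hmlt
      simp only [hget]
      split_ifs with hkey
      · refine ih (hi - ((lo + hi) / 2 + 1)) (by omega) _ hi rfl (by omega) hhE ?_ hhi
        intro e he
        obtain ⟨i, hi', hei⟩ := List.mem_iff_getElem.mp he
        have hil : i < E.length := by
          simp only [List.length_take] at hi'; omega
        have him : i ≤ (lo + hi) / 2 := by
          simp only [List.length_take] at hi'; omega
        have hei' : e = E[i] := by rw [← hei, List.getElem_take]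
        by_cases hieq : i = (lo + hi) / 2
        · subst hieq; rw [hei']; exact hkey
        · have hij := List.pairwise_iff_getElem.mp hpair i ((lo + hi) / 2) hil hmlt (by omega)
          rw [hei']; linarith
      · refine ih ((lo + hi) / 2 - lo) (by omega) lo _ rfl (by omega) (by omega) hlo ?_
        push Not at hkey
        intro e he
        obtain ⟨j, hj, hej⟩ := List.mem_iff_getElem.mp he
        have hjl : (lo + hi) / 2 + j < E.length := by
          simp only [List.length_drop] at hj; omega
        have hej' : e = E[(lo + hi) / 2 + j] := by rw [← hej, List.getElem_drop]
        by_cases hj0 : j = 0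
        · subst hj0; rw [hej']; simpa using hkey
        · have hij := List.pairwise_iff_getElem.mp hpair ((lo + hi) / 2)
            ((lo + hi) / 2 + j) hmlt hjl (by omega)
          rw [hej']; linarith
    · rw [dif_neg h]
      exact ⟨hlo, by rw [show lo = hi from by omega]; exact hhi⟩

lemma cnt_entry_of_nodup (E : List ((Int × Int) × Int)) (e : (Int × Int) × Int)
    (he : e ∈ E) (hnd : (E.map Prod.fst).Nodup) : pvCnt E e.1 = e.2 := by
  induction E with
  | nil => cases he
  | cons f E ih =>
    simp only [List.map_cons, List.nodup_cons] at hnd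
    rcases List.mem_cons.mp he with he | he
    · subst he; simp [pvCnt_cons]
    · rw [pvCnt_cons, if_neg (fun hh => hnd.1 (by rw [hh]; exact List.mem_map_of_mem he))]
      exact ih he hnd.2

lemma find?_fst_none_left (X Y : List ((Int × Int) × Int)) (y : (Int × Int) × Int)
    (hnd : ((X ++ Y).map Prod.fst).Nodup) (hy : y ∈ Y) :
    X.find? (fun e => decide (e.1 = y.1)) = none := by
  rw [List.find?_eq_none]
  intro x hx
  simp only [decide_eq_true_eq]
  intro hxy
  rw [List.map_append] at hnd
  exact (List.disjoint_of_nodup_append hnd) (List.mem_map_of_mem hx)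
    (hxy ▸ List.mem_map_of_mem hy)

lemma pvCnt_append (X Y : List ((Int × Int) × Int)) (p : Int × Int) :
    pvCnt (X ++ Y) p = match X.find? (fun e => decide (e.1 = p)) with
      | some e => e.2
      | none => pvCnt Y p := by
  simp only [pvCnt, List.find?_append]
  cases h : X.find? (fun e => decide (e.1 = p)) <;> simp


-- one query step: A's scan of the full sorted list against the count dict finds the same
-- interval as B's bisection-plus-scan of the compressed list, and the two state updates
-- keep the counts aligned
lemma step_eq (orden : List (Int × Int)) (t : Int) (d : PySem.Dict (Int × Int) Int)
    (E : List ((Int × Int) × Int))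
    (hfind : ∀ q : (Int × Int) → Bool, orden.find? q = (E.map Prod.fst).find? q)
    (hnd : (E.map Prod.fst).Nodup)
    (hpair : E.Pairwise (fun a b => a.1.1 + a.1.2 ≤ b.1.1 + b.1.2))
    (hcnt : ∀ p, d.getD p 0 = pvCnt E p) :
    (es_culpable_buscar d t orden = none ∧
       es_culpable_alt_busca t (E.drop (es_culpable_alt_bisect E t 0 E.length)) = none) ∨
    (∃ p L', es_culpable_buscar d t orden = some p ∧
       es_culpable_alt_busca t (E.drop (es_culpable_alt_bisect E t 0 E.length)) = some (p, L') ∧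
       ((E.take (es_culpable_alt_bisect E t 0 E.length) ++ L').map Prod.fst = E.map Prod.fst) ∧
       (∀ x, (d.insert p (d.getD p 0 - 1)).getD x 0
          = pvCnt (E.take (es_culpable_alt_bisect E t 0 E.length) ++ L') x)) := by
  obtain ⟨hlt, hge⟩ := bisect_spec E t hpair E.length 0 E.length (by omega) (by omega)
    le_rfl (by simp) (by simp)
  set lb := es_culpable_alt_bisect E t 0 E.length with hlb
  -- A's scan as find? over the compressed entries
  have hchain : es_culpable_buscar d t orden
      = ((E.drop lb).find? (fun e => decide (e.1.1 - e.1.2 ≤ t) && decide (e.2 > 0))).map Prod.fst := by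
    rw [buscar_eq_find?, hfind, List.find?_map]
    have h1 : E.find? ((fun x : Int × Int =>
          decide (t ≥ x.1 - x.2) && decide (t ≤ x.1 + x.2) && decide (d.getD x 0 > 0)) ∘ Prod.fst)
        = E.find? (fun e => decide (t ≥ e.1.1 - e.1.2) && decide (t ≤ e.1.1 + e.1.2) && decide (e.2 > 0)) := by
      refine find?_congr_mem E _ _ (fun e he => ?_)
      simp only [Function.comp_apply, hcnt e.1, cnt_entry_of_nodup E e he hnd]
    rw [h1]
    have h2 : (E.take lb).find? (fun e =>
        decide (t ≥ e.1.1 - e.1.2) && decide (t ≤ e.1.1 + e.1.2) && decide (e.2 > 0)) = none := by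
      rw [List.find?_eq_none]
      intro e he
      have := hlt e he
      simp only [Bool.and_eq_true, decide_eq_true_eq, not_and]
      intro _ hle
      omega
    have h3 : (E.drop lb).find? (fun e =>
          decide (t ≥ e.1.1 - e.1.2) && decide (t ≤ e.1.1 + e.1.2) && decide (e.2 > 0))
        = (E.drop lb).find? (fun e => decide (e.1.1 - e.1.2 ≤ t) && decide (e.2 > 0)) := by
      refine find?_congr_mem _ _ _ (fun e he => ?_)
      have hue : t ≤ e.1.1 + e.1.2 := hge e he
      simp [hue, ge_iff_le]
    conv_lhs => rw [show E = E.take lb ++ E.drop lb from (List.take_append_drop lb E).symm]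
    rw [List.find?_append, h2, Option.none_or, h3]
  have hndd : ((E.drop lb).map Prod.fst).Nodup := by
    rw [List.map_drop]; exact hnd.sublist (List.drop_sublist _ _)
  rcases busca_spec t (E.drop lb) with ⟨h1, h2⟩ | ⟨e, L', h1, h2, h3, h4⟩
  · left
    exact ⟨by rw [hchain, h2]; rfl, h1⟩
  · right
    refine ⟨e.1, L', by rw [hchain, h2]; rfl, h1, ?_, ?_⟩
    · rw [List.map_append, h3, ← List.map_append, List.take_append_drop]
    · intro x
      have heE : e ∈ E.drop lb := List.mem_of_find?_eq_some h2
      have hndE : ((E.take lb ++ E.drop lb).map Prod.fst).Nodup := by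
        rw [List.take_append_drop]; exact hnd
      rcases h4 hndd with ⟨h4a, h4b⟩
      have htn : (E.take lb).find? (fun f => decide (f.1 = e.1)) = none :=
        find?_fst_none_left _ _ e hndE heE
      have hEsplit : ∀ p, pvCnt E p = pvCnt (E.take lb ++ E.drop lb) p := by
        intro p; rw [List.take_append_drop]
      by_cases hx : x = e.1
      · subst hx
        rw [PySem.Dict.getD_insert_self, hcnt, pvCnt_append, htn, hEsplit, pvCnt_append, htn, h4a]
      · rw [PySem.Dict.getD_insert_of_ne _ _ _ hx, hcnt, hEsplit, pvCnt_append, pvCnt_append]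
        cases hf : (E.take lb).find? (fun f => decide (f.1 = x)) with
        | some f => rfl
        | none => exact (h4b x hx).symm

-- the whole query loop, by induction along the suspect times
lemma loop_eq (orden : List (Int × Int)) (S : List Int) (d : PySem.Dict (Int × Int) Int)
    (E : List ((Int × Int) × Int)) (acc : List (Int × (Int × Int)))
    (hfind : ∀ q : (Int × Int) → Bool, orden.find? q = (E.map Prod.fst).find? q)
    (hnd : (E.map Prod.fst).Nodup)
    (hpair : E.Pairwise (fun a b => a.1.1 + a.1.2 ≤ b.1.1 + b.1.2))
    (hcnt : ∀ p, d.getD p 0 = pvCnt E p) :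
    (S.foldl (fun st t => match es_culpable_buscar st.1 t orden with
      | none => st
      | some tr => (st.1.insert tr (st.1.getD tr 0 - 1), st.2 ++ [(t, tr)])) (d, acc)).2
    = (S.foldl (fun st t =>
        let lo := es_culpable_alt_bisect st.1 t 0 st.1.length
        match es_culpable_alt_busca t (st.1.drop lo) with
        | none => st
        | some (p, resto') => (st.1.take lo ++ resto', st.2 ++ [(t, p)])) (E, acc)).2 := by
  induction S generalizing d E acc with
  | nil => rfl
  | cons t S ih =>
    simp only [List.foldl_cons]
    rcases step_eq orden t d E hfind hnd hpair hcnt with ⟨h1, h2⟩ | ⟨p, L', h1, h2, h3, h4⟩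
    · rw [h1, h2]
      exact ih d E acc hfind hnd hpair hcnt
    · rw [h1, h2]
      have hfst : (E.take (es_culpable_alt_bisect E t 0 E.length) ++ L').map Prod.fst
          = E.map Prod.fst := h3
      refine ih _ _ _ (fun q => by rw [hfind, hfst]) (hfst ▸ hnd) ?_ h4
      have hp1 : ((E.take (es_culpable_alt_bisect E t 0 E.length) ++ L').map Prod.fst).Pairwise
          (fun a b : Int × Int => a.1 + a.2 ≤ b.1 + b.2) := by
        rw [hfst]
        exact (List.pairwise_map (f := Prod.fst)
          (R := fun a b : Int × Int => a.1 + a.2 ≤ b.1 + b.2)).mpr hpair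
      exact (List.pairwise_map (f := Prod.fst)
        (R := fun a b : Int × Int => a.1 + a.2 ≤ b.1 + b.2)).mp hp1

-- ===== VERDICT (by name: the statement is the Claim_ definition above) =====
theorem es_culpable_spec : Claim_equal_es_culpable := by
  intro T S _
  show es_culpable T S = es_culpable_alt T S
  set orden := PySem.List.sorted T (fun p => p.1 + p.2) with ho
  set E0 := orden.foldl es_culpable_alt_agrega [] with hE0
  have hfst : E0.map Prod.fst = orden.foldl pvUniqStep [] := by
    simpa using foldl_agrega_fst orden []
  have hfind : ∀ q : (Int × Int) → Bool, orden.find? q = (E0.map Prod.fst).find? q := by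
    intro q
    rw [hfst, foldl_uniqStep_find?]
    simp
  have hnd : (E0.map Prod.fst).Nodup := by
    rw [hfst]; exact foldl_uniqStep_nodup orden [] (by simp)
  have hpairF : (E0.map Prod.fst).Pairwise (fun a b : Int × Int => a.1 + a.2 ≤ b.1 + b.2) := by
    rw [hfst]
    exact foldl_uniqStep_pairwise (fun p => p.1 + p.2) orden [] (by simp) (by simp)
      (PySem.List.sorted_pairwise T (fun p => p.1 + p.2))
  have hpair : E0.Pairwise (fun a b => a.1.1 + a.1.2 ≤ b.1.1 + b.1.2) :=
    (List.pairwise_map (f := Prod.fst)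
      (R := fun a b : Int × Int => a.1 + a.2 ≤ b.1 + b.2)).mp hpairF
  have hcnt : ∀ p, (dic_transacciones T).getD p 0 = pvCnt E0 p := by
    intro p
    unfold dic_transacciones
    rw [PySem.Dict.getD_foldl_insert_add_one]
    have h1 : pvCnt E0 p = pvCnt ([] : List ((Int × Int) × Int)) p + orden.count p :=
      foldl_agrega_cnt orden [] p
    have h2 : orden.count p = T.count p := (PySem.List.sorted_perm T _ _).count_eq p
    rw [h1, ← h2]
    simp [pvCnt]
  exact loop_eq orden S (dic_transacciones T) E0 [] hfind hnd hpair hcnt
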